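-- pv_equiv track=rewrite | github.com/OA256864/MEL_Tweets | code/corpus/twitterDataDB.py | isTweetValid
-- ===== SOURCE A (Python) =====
-- def isTweetValid(text):
--     textTweet = text.split(None)
--           #print line
--     if ("RT" in textTweet[0]):
--        return False
--     indeX = 0
--     for i in range(len(textTweet)):
--         if "@" not in textTweet[i] :
--            indeX = i
--            break
--
--     remainingText = textTweet[indeX:]
--     #Check in the remaining text, if it contains a mention @xxxxxx
--     containsMention = False
--     for rwds in remainingText:
--         if "@" in rwds:
--            containsMention = True
--            break
--     return containsMention
-- ===== SOURCE B (Python) =====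
-- def isTweetValid(text):
--     tokens = text.split()
--     if "RT" in tokens[0]:
--         return False
--     found_non_mention = False
--     for w in tokens:
--         if found_non_mention:
--             if "@" in w:
--                 return True
--         elif "@" not in w:
--             found_non_mention = True
--     return not found_non_mention
-- ===== Notes on version B (the rewrite author's own statement) =====
-- stated objective: simpler
-- what changed: Replaces A's two sequential loops (find first non-mention index, then slice and scan for '@') with a single pass over the tokens maintaining one boolean flag, returning early on the first '@' after a non-mention token; no slicing.
import Mathlib
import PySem

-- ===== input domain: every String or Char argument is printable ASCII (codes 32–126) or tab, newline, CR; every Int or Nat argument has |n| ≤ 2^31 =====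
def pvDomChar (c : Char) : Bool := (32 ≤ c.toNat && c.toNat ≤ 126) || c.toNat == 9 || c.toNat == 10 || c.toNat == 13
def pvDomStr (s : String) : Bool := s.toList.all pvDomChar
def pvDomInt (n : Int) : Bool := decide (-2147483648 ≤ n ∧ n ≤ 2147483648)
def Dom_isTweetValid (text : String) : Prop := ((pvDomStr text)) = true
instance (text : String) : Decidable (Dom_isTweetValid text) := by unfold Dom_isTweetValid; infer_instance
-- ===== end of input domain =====

-- B merges A's two loops (find first non-mention index, then slice and scan for '@')
-- into one pass with a single boolean flag; objective: simpler.

-- ===== PORT A =====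
-- 'for i in range(len(textTweet)): if "@" not in textTweet[i]: indeX = i; break'
-- (sequential walk carrying the index; indeX stays 0 if the loop never breaks)
def aFindIdx : List String → Int → Int
  | [], _ => 0
  | w :: rest, i => if !(PySem.Str.isIn "@" w) then i else aFindIdx rest (i + 1)

-- 'for rwds in remainingText: if "@" in rwds: containsMention = True; break'
def aContains : List String → Bool
  | [] => false
  | w :: rest => if PySem.Str.isIn "@" w then true else aContains rest

def isTweetValid (text : String) : Bool :=
  let textTweet := PySem.Str.split₀ text
  match PySem.List.pyGet? textTweet 0 with
  | none => false   -- textTweet[0] raises IndexError; excluded by Pre_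
  | some t0 =>
    if PySem.Str.isIn "RT" t0 then false
    else
      let indeX := aFindIdx textTweet 0
      let remainingText := PySem.List.slice textTweet (some indeX) none
      aContains remainingText

-- ===== PORT B =====
-- single pass: flag 'found' = a non-mention token has been seen; early True on '@' after it
def bLoop : List String → Bool → Bool
  | [], found => !found
  | w :: rest, found =>
    if found then
      if PySem.Str.isIn "@" w then true else bLoop rest found
    else
      if !(PySem.Str.isIn "@" w) then bLoop rest true else bLoop rest found

def isTweetValid_alt (text : String) : Bool :=
  let tokens := PySem.Str.split₀ text
  match PySem.List.pyGet? tokens 0 with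
  | none => false   -- tokens[0] raises IndexError; excluded by Pre_
  | some t0 =>
    if PySem.Str.isIn "RT" t0 then false
    else bLoop tokens false

-- ===== PRECONDITION & SPEC =====
-- Both A and B raise IndexError on text with no non-whitespace character (tokens[0]); excluded.
def Pre_isTweetValid (text : String) : Prop := PySem.Str.split₀ text ≠ []
instance (text : String) : Decidable (Pre_isTweetValid text) := by unfold Pre_isTweetValid; infer_instance
def pvWitness_isTweetValid : String := "hello @you"

def Spec_isTweetValid (text : String) (out : Bool) : Prop := out = isTweetValid_alt text
instance (text : String) (out : Bool) : Decidable (Spec_isTweetValid text out) := by unfold Spec_isTweetValid; infer_instance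

-- ===== CLAIM (what is proved, stated in full; the proofs are below) =====
def Claim_equal_isTweetValid : Prop := ∀ (text : String), Dom_isTweetValid text → Pre_isTweetValid text → Spec_isTweetValid text (isTweetValid text)

-- ===== LEMMAS AND PROOFS =====

-- all lemmas are stated over the simp-normal predicate form (Chars.isIn ['@'])
def hasAt (w : String) : Bool := PySem.Chars.isIn ['@'] w.toList

-- once the flag is set, B's loop is exactly A's second loop
theorem bLoop_true (ts : List String) : bLoop ts true = aContains ts := by
  induction ts with
  | nil => rfl
  | cons w rest ih => simp [bLoop, aContains, ih]

theorem aContains_eq_any (ts : List String) :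
    aContains ts = ts.any hasAt := by
  induction ts with
  | nil => rfl
  | cons w rest ih =>
    by_cases h : hasAt w = true <;>
      simp_all [aContains, hasAt]

-- A's first loop computes 0 when all tokens mention '@', else the first non-mention index
theorem aFindIdx_all (ts : List String) (i : Int)
    (h : ts.all hasAt = true) : aFindIdx ts i = 0 := by
  induction ts generalizing i with
  | nil => rfl
  | cons w rest ih =>
    simp only [List.all_cons, Bool.and_eq_true] at h
    have h1 : PySem.Chars.isIn ['@'] w.toList = true := h.1
    simp [aFindIdx, h1, ih _ h.2]

theorem aFindIdx_not_all (ts : List String) (i : Nat)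
    (h : ts.all hasAt = false) :
    aFindIdx ts i = ((i + ts.findIdx (fun w => !(hasAt w)) : Nat) : Int) := by
  induction ts generalizing i with
  | nil => simp at h
  | cons w rest ih =>
    by_cases hw : hasAt w = true
    · simp only [List.all_cons, hw, Bool.true_and] at h
      have := ih (i + 1) h
      have hw' : PySem.Chars.isIn ['@'] w.toList = true := hw
      simp only [hasAt] at this
      push_cast at this ⊢
      simp [aFindIdx, hw', List.findIdx_cons, hasAt, this]
      ring
    · simp only [hasAt, Bool.not_eq_true] at hw
      simp [aFindIdx, hw, List.findIdx_cons, hasAt]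

theorem bLoop_all (ts : List String) (hall : ts.all hasAt = true) :
    bLoop ts false = true := by
  induction ts with
  | nil => rfl
  | cons w rest ih =>
    simp only [List.all_cons, Bool.and_eq_true] at hall
    have h1 : PySem.Chars.isIn ['@'] w.toList = true := hall.1
    simp [bLoop, h1, ih hall.2]

-- core equivalence of the two loop structures on any nonempty token list
theorem core_eq (ts : List String) (hne : ts ≠ []) :
    aContains (PySem.List.slice ts (some (aFindIdx ts 0)) none) = bLoop ts false := by
  by_cases hall : ts.all hasAt = true
  · -- all tokens contain '@': A slices from 0 and finds one; B's flag never sets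
    have h0 : aFindIdx ts 0 = ((0 : Nat) : Int) := aFindIdx_all ts 0 hall
    rw [h0, PySem.List.slice_from_natCast, List.drop_zero]
    have hA : aContains ts = true := by
      rw [aContains_eq_any]
      cases ts with
      | nil => exact absurd rfl hne
      | cons w rest =>
        simp only [List.all_cons, Bool.and_eq_true] at hall
        simp [hall.1]
    rw [hA, bLoop_all ts hall]
  · -- some token lacks '@': both reduce to scanning from the first such token
    have hall' : ts.all hasAt = false := by
      cases h : ts.all hasAt <;> simp_all
    have h0 : aFindIdx ts 0 = ((ts.findIdx (fun w => !(hasAt w)) : Nat) : Int) := by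
      simpa using aFindIdx_not_all ts 0 hall'
    rw [h0, PySem.List.slice_from_natCast]
    clear h0 hall hne
    induction ts with
    | nil => simp at hall'
    | cons w rest ih =>
      by_cases hw : hasAt w = true
      · simp only [List.all_cons, hw, Bool.true_and] at hall'
        have hs : PySem.Str.isIn "@" w = hasAt w := rfl
        simp only [List.findIdx_cons, hs, hw, Bool.not_true, cond_false,
          bLoop, Bool.false_eq_true, if_false, List.drop_succ_cons]
        exact ih hall' 
      · simp only [hasAt, Bool.not_eq_true] at hw
        simp [List.findIdx_cons, hw, bLoop, bLoop_true, aContains, hasAt]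

-- ===== VERDICT (by name: the statement is the Claim_ definition above) =====
theorem isTweetValid_spec : Claim_equal_isTweetValid := by
  intro text _ hpre
  unfold Spec_isTweetValid isTweetValid isTweetValid_alt
  cases hts : PySem.Str.split₀ text with
  | nil => exact absurd hts hpre
  | cons t0 rest =>
    simp only [PySem.List.pyGet?_zero_cons]
    have := core_eq (t0 :: rest) (by simp)
    by_cases hrt : PySem.Str.isIn "RT" t0 = true <;>
      simp_all
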